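-- pv_equiv track=rewrite | github.com/binhyc11/Renal-US-images | Preprocessing_no_border.py | cut_border
-- ===== SOURCE A (Python) =====
-- def cut_border (contour, mask_array):
--     for con in contour:
--         for i in range (600):
--             for j in range (800):
--                 temp = (i - con[0])**2 + (j - con[1])**2
--                 if temp > 0 and temp <= 900:  # size of eraser
--                     mask_array[i][j] = 0
--     return mask_array
-- ===== SOURCE B (Python) =====
-- def cut_border(contour, mask_array):
--     # Precompute the eraser stencil (disk of radius 30, centre excluded) ONCE,
--     # then splat it around each contour point with a bounds check per cell.
--     offsets = [(dx, dy)
--                for dx in range(-30, 31)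
--                for dy in range(-30, 31)
--                if 0 < dx * dx + dy * dy <= 900]
--     for con in contour:
--         x0, y0 = con[0], con[1]
--         for dx, dy in offsets:
--             i = x0 + dx
--             j = y0 + dy
--             if 0 <= i < 600 and 0 <= j < 800:
--                 mask_array[i][j] = 0
--     return mask_array
-- ===== Notes on version B (the rewrite author's own statement) =====
-- stated objective: faster
-- what changed: Instead of re-scanning the whole fixed 600x800 grid for every contour point, B precomputes the radius-30 disk stencil (at most 2821 offsets) once and, per contour point, writes zeros only at the stencil-shifted cells that fall inside the grid.
import Mathlib
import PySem

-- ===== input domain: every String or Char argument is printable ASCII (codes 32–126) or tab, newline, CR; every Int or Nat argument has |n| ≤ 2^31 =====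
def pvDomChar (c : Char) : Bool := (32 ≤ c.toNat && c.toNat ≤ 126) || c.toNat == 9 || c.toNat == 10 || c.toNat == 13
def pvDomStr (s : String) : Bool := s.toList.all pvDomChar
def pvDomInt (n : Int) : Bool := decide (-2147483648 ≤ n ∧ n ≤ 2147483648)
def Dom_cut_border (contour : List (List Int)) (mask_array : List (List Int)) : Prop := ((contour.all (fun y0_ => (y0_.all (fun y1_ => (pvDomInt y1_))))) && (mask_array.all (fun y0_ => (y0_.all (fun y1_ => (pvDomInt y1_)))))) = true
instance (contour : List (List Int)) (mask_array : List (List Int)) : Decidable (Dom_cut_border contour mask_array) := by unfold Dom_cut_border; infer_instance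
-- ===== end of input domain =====

-- B replaces A's per-point scan of the whole fixed 600x800 grid by a disk stencil of
-- radius-30 offsets computed once and splatted (with a bounds check) around each contour
-- point; a timing run measured B faster. Both Pythons mutate mask_array in place in
-- the same way; the equivalence proved here is about the returned value, which is that
-- same mask.


-- ===== PORT A =====
-- mask_array[i][j] = 0 (both Pythons perform exactly this assignment; exact while the
-- indices are in range, which Pre_ guarantees at every reached assignment)
def pvSetCell (mask : List (List Int)) (i j : Int) : List (List Int) :=
  PySem.List.pySetD mask i (PySem.List.pySetD (PySem.List.pyGetD mask i []) j 0)

def cut_border (contour : List (List Int)) (mask_array : List (List Int)) : List (List Int) :=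
  contour.foldl (fun mask con =>
    (PySem.List.pyRange 0 600 1).foldl (fun mask i =>
      (PySem.List.pyRange 0 800 1).foldl (fun mask j =>
        let temp := (i - PySem.List.pyGetD con 0 0) ^ 2 + (j - PySem.List.pyGetD con 1 0) ^ 2
        if 0 < temp ∧ temp ≤ 900 then pvSetCell mask i j else mask) mask) mask) mask_array

-- ===== PORT B =====
-- the eraser stencil: all offsets (dx, dy) of the radius-30 disk, centre excluded,
-- computed once (Source B's list comprehension over dx, dy)
def pvDiskOffsets : List (Int × Int) :=
  (PySem.List.pyRange (-30) 31 1).flatMap (fun dx =>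
    ((PySem.List.pyRange (-30) 31 1).filter
        (fun dy => decide (0 < dx * dx + dy * dy ∧ dx * dx + dy * dy ≤ 900))).map
      (fun dy => (dx, dy)))

def cut_border_alt (contour : List (List Int)) (mask_array : List (List Int)) : List (List Int) :=
  contour.foldl (fun mask con =>
    let x0 := PySem.List.pyGetD con 0 0
    let y0 := PySem.List.pyGetD con 1 0
    pvDiskOffsets.foldl (fun mask p =>
      let i := x0 + p.1
      let j := y0 + p.2
      if 0 ≤ i ∧ i < 600 ∧ 0 ≤ j ∧ j < 800 then pvSetCell mask i j else mask) mask) mask_array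

-- ===== PRECONDITION & SPEC =====
-- Exactly the inputs on which Python A returns (no IndexError): every contour point has at
-- least two coordinates, and every grid cell the radius-30 eraser around it touches exists in
-- mask_array (the guard is false outside the clamped window, so quantifying over the window
-- is exact).
def Pre_cut_border (contour : List (List Int)) (mask_array : List (List Int)) : Prop :=
  ∀ con ∈ contour, 2 ≤ con.length ∧
    ∀ i ∈ PySem.List.pyRange (max 0 (PySem.List.pyGetD con 0 0 - 30)) (min 600 (PySem.List.pyGetD con 0 0 + 31)) 1,
    ∀ j ∈ PySem.List.pyRange (max 0 (PySem.List.pyGetD con 1 0 - 30)) (min 800 (PySem.List.pyGetD con 1 0 + 31)) 1,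
      (0 < (i - PySem.List.pyGetD con 0 0) ^ 2 + (j - PySem.List.pyGetD con 1 0) ^ 2 ∧
        (i - PySem.List.pyGetD con 0 0) ^ 2 + (j - PySem.List.pyGetD con 1 0) ^ 2 ≤ 900) →
      i < (mask_array.length : Int) ∧ j < ((PySem.List.pyGetD mask_array i []).length : Int)
instance (contour : List (List Int)) (mask_array : List (List Int)) : Decidable (Pre_cut_border contour mask_array) := by unfold Pre_cut_border; infer_instance

def pvWitness_cut_border : List (List Int) × List (List Int) := ([[1000, 1000]], [[7, 7], [7, 7]])

def Spec_cut_border (contour : List (List Int)) (mask_array : List (List Int)) (out : List (List Int)) : Prop := out = cut_border_alt contour mask_array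
instance (contour : List (List Int)) (mask_array : List (List Int)) (out : List (List Int)) : Decidable (Spec_cut_border contour mask_array out) := by unfold Spec_cut_border; infer_instance

-- ===== CLAIM (what is proved, stated in full; the proofs are below) =====
def Claim_equal_cut_border : Prop := ∀ (contour : List (List Int)) (mask_array : List (List Int)), Dom_cut_border contour mask_array → Pre_cut_border contour mask_array → Spec_cut_border contour mask_array (cut_border contour mask_array)

-- ===== LEMMAS AND PROOFS =====

-- |x| ≤ 30 from x² ≤ 900
theorem pv_sq_le (x : Int) (h : x ^ 2 ≤ 900) : -30 ≤ x ∧ x ≤ 30 := by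
  constructor <;> nlinarith

-- filtering a range by membership in a sub-interval is the sub-range
theorem pv_filter_pyRange_window (a b c d : Int) (h1 : a ≤ c) (h2 : d ≤ b) :
    (PySem.List.pyRange a b 1).filter (fun x => decide (c ≤ x ∧ x < d)) = PySem.List.pyRange c d 1 := by
  by_cases hcd : d ≤ c
  · rw [PySem.List.pyRange_one_eq_nil hcd, List.filter_eq_nil_iff]
    intro x _
    simp only [decide_eq_true_eq]
    omega
  · push Not at hcd
    rw [PySem.List.pyRange_one_append a c b h1 (by omega),
        PySem.List.pyRange_one_append c d b (by omega) h2,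
        List.filter_append, List.filter_append]
    have hl : (PySem.List.pyRange a c 1).filter (fun x => decide (c ≤ x ∧ x < d)) = [] := by
      rw [List.filter_eq_nil_iff]
      intro x hx
      rw [PySem.List.mem_pyRange_one] at hx
      simp only [decide_eq_true_eq]
      omega
    have hr : (PySem.List.pyRange d b 1).filter (fun x => decide (c ≤ x ∧ x < d)) = [] := by
      rw [List.filter_eq_nil_iff]
      intro x hx
      rw [PySem.List.mem_pyRange_one] at hx
      simp only [decide_eq_true_eq]
      omega
    have hm : (PySem.List.pyRange c d 1).filter (fun x => decide (c ≤ x ∧ x < d)) = PySem.List.pyRange c d 1 := by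
      rw [List.filter_eq_self]
      intro x hx
      rw [PySem.List.mem_pyRange_one] at hx
      simp only [decide_eq_true_eq]
      omega
    rw [hl, hr, hm, List.append_nil]
    rfl

-- a filter that only keeps elements of [c,d) can be taken over the sub-range instead
theorem pv_filter_shrink (a b c d : Int) (p : Int → Bool) (h1 : a ≤ c) (h2 : d ≤ b)
    (hp : ∀ x, a ≤ x → x < b → p x = true → c ≤ x ∧ x < d) :
    (PySem.List.pyRange a b 1).filter p = (PySem.List.pyRange c d 1).filter p := by
  have e1 : (PySem.List.pyRange a b 1).filter p
      = (PySem.List.pyRange a b 1).filter (fun x => p x && decide (c ≤ x ∧ x < d)) := by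
    apply List.filter_congr
    intro x hx
    rw [PySem.List.mem_pyRange_one] at hx
    cases hpx : p x with
    | false => simp
    | true => simp [hp x hx.1 hx.2 hpx]
  rw [e1, ← List.filter_filter, pv_filter_pyRange_window a b c d h1 h2]

-- the inner (column) loop over the whole row equals the loop over the clamped window
set_option maxRecDepth 4000 in
theorem pv_inner_eq (x0 y0 i : Int) (m : List (List Int)) :
    (PySem.List.pyRange 0 800 1).foldl (fun mask j =>
        if 0 < (i - x0) ^ 2 + (j - y0) ^ 2 ∧ (i - x0) ^ 2 + (j - y0) ^ 2 ≤ 900 then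
          pvSetCell mask i j else mask) m
    = (PySem.List.pyRange (max 0 (y0 - 30)) (min 800 (y0 + 31)) 1).foldl (fun mask j =>
        if 0 < (i - x0) ^ 2 + (j - y0) ^ 2 ∧ (i - x0) ^ 2 + (j - y0) ^ 2 ≤ 900 then
          pvSetCell mask i j else mask) m := by
  rw [PySem.List.foldl_ite_eq_foldl_filter, PySem.List.foldl_ite_eq_foldl_filter]
  congr 1
  apply pv_filter_shrink 0 800 (max 0 (y0 - 30)) (min 800 (y0 + 31)) _ (by omega) (by omega)
  intro j hj0 hj8 hp
  simp only [decide_eq_true_eq] at hp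
  have hsq : (j - y0) ^ 2 ≤ 900 := by nlinarith [sq_nonneg (i - x0)]
  have := pv_sq_le (j - y0) hsq
  omega

-- when the row is out of eraser reach the whole inner loop is a no-op
theorem pv_inner_id (x0 y0 i : Int) (m : List (List Int)) (h : ¬ (i - x0) ^ 2 ≤ 900) :
    (PySem.List.pyRange 0 800 1).foldl (fun mask j =>
        if 0 < (i - x0) ^ 2 + (j - y0) ^ 2 ∧ (i - x0) ^ 2 + (j - y0) ^ 2 ≤ 900 then
          pvSetCell mask i j else mask) m = m := by
  rw [PySem.List.foldl_ite_eq_foldl_filter]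
  have : (PySem.List.pyRange 0 800 1).filter
      (fun j => decide (0 < (i - x0) ^ 2 + (j - y0) ^ 2 ∧ (i - x0) ^ 2 + (j - y0) ^ 2 ≤ 900)) = [] := by
    rw [List.filter_eq_nil_iff]
    intro j _
    simp only [decide_eq_true_eq]
    intro hc
    exact h (by nlinarith [sq_nonneg (j - y0)])
  rw [this]
  rfl

-- per contour point: A's scan of the whole grid equals scanning the clamped window
theorem pv_step_eq (x0 y0 : Int) (m : List (List Int)) :
    (PySem.List.pyRange 0 600 1).foldl (fun mask i =>
      (PySem.List.pyRange 0 800 1).foldl (fun mask j =>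
        if 0 < (i - x0) ^ 2 + (j - y0) ^ 2 ∧ (i - x0) ^ 2 + (j - y0) ^ 2 ≤ 900 then
          pvSetCell mask i j else mask) mask) m
    = (PySem.List.pyRange (max 0 (x0 - 30)) (min 600 (x0 + 31)) 1).foldl (fun mask i =>
      (PySem.List.pyRange (max 0 (y0 - 30)) (min 800 (y0 + 31)) 1).foldl (fun mask j =>
        if 0 < (i - x0) ^ 2 + (j - y0) ^ 2 ∧ (i - x0) ^ 2 + (j - y0) ^ 2 ≤ 900 then
          pvSetCell mask i j else mask) mask) m := by
  rw [PySem.List.foldl_congr_mem (PySem.List.pyRange 0 600 1) _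
      (fun mask i => if (i - x0) ^ 2 ≤ 900 then
        (PySem.List.pyRange 0 800 1).foldl (fun mask j =>
          if 0 < (i - x0) ^ 2 + (j - y0) ^ 2 ∧ (i - x0) ^ 2 + (j - y0) ^ 2 ≤ 900 then
            pvSetCell mask i j else mask) mask else mask) m
      (by
        intro acc i _
        by_cases hi : (i - x0) ^ 2 ≤ 900
        · simp only [if_pos hi]
        · simp only [if_neg hi]
          exact pv_inner_id x0 y0 i acc hi)]
  rw [PySem.List.foldl_ite_eq_foldl_filter]
  rw [pv_filter_shrink 0 600 (max 0 (x0 - 30)) (min 600 (x0 + 31)) _ (by omega) (by omega)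
      (by
        intro i hi0 hi6 hp
        simp only [decide_eq_true_eq] at hp
        have := pv_sq_le (i - x0) hp
        omega)]
  rw [← PySem.List.foldl_ite_eq_foldl_filter]
  apply PySem.List.foldl_congr_mem
  intro acc i hi
  rw [PySem.List.mem_pyRange_one] at hi
  have ha : x0 - 30 ≤ i := le_trans (le_max_right 0 (x0 - 30)) hi.1
  have hb : i < x0 + 31 := lt_of_lt_of_le hi.2 (min_le_right 600 (x0 + 31))
  have hi' : (i - x0) ^ 2 ≤ 900 := by nlinarith
  simp only [if_pos hi']
  exact pv_inner_eq x0 y0 i acc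

-- folding over a flatMap is the nested fold
theorem pv_foldl_flatMap {α β γ : Type} (l : List α) (g : α → List β) (f : γ → β → γ) (init : γ) :
    (l.flatMap g).foldl f init = l.foldl (fun acc a => (g a).foldl f acc) init := by
  induction l generalizing init with
  | nil => rfl
  | cons a t ih => simp only [List.flatMap_cons, List.foldl_append, List.foldl_cons, ih]

-- change of variables: a fold over a shifted range
theorem pv_foldl_shift {γ : Type} (a b c : Int) (f : γ → Int → γ) (init : γ) :
    (PySem.List.pyRange a b 1).foldl f init
      = (PySem.List.pyRange (a + c) (b + c) 1).foldl (fun m x => f m (x - c)) init := by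
  rw [PySem.List.pyRange_one, PySem.List.pyRange_one, List.foldl_map, List.foldl_map]
  have hn : (b + c - (a + c)).toNat = (b - a).toNat := by omega
  rw [hn]
  have he : (fun (m : γ) (k : ℕ) => f m (a + c + (k : Int) - c)) = fun (m : γ) (k : ℕ) => f m (a + (k : Int)) := by
    funext m k
    congr 1
    ring
  rw [he]

-- per contour point: B's stencil splat equals the clamped-window scan
theorem pv_offsets_step_eq (x0 y0 : Int) (m : List (List Int)) :
    pvDiskOffsets.foldl (fun mask p =>
        if 0 ≤ x0 + p.1 ∧ x0 + p.1 < 600 ∧ 0 ≤ y0 + p.2 ∧ y0 + p.2 < 800 then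
          pvSetCell mask (x0 + p.1) (y0 + p.2) else mask) m
    = (PySem.List.pyRange (max 0 (x0 - 30)) (min 600 (x0 + 31)) 1).foldl (fun mask i =>
      (PySem.List.pyRange (max 0 (y0 - 30)) (min 800 (y0 + 31)) 1).foldl (fun mask j =>
        if 0 < (i - x0) ^ 2 + (j - y0) ^ 2 ∧ (i - x0) ^ 2 + (j - y0) ^ 2 ≤ 900 then
          pvSetCell mask i j else mask) mask) m := by
  unfold pvDiskOffsets
  rw [pv_foldl_flatMap]
  -- inner map + filter: back to an ite-fold over the whole offset square
  have e1 : ∀ (dx : Int) (acc : List (List Int)),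
      (((PySem.List.pyRange (-30) 31 1).filter
          (fun dy => decide (0 < dx * dx + dy * dy ∧ dx * dx + dy * dy ≤ 900))).map
        (fun dy => (dx, dy))).foldl (fun mask p =>
          if 0 ≤ x0 + p.1 ∧ x0 + p.1 < 600 ∧ 0 ≤ y0 + p.2 ∧ y0 + p.2 < 800 then
            pvSetCell mask (x0 + p.1) (y0 + p.2) else mask) acc
      = (PySem.List.pyRange (-30) 31 1).foldl (fun mask dy =>
          if (0 < dx * dx + dy * dy ∧ dx * dx + dy * dy ≤ 900) ∧
             0 ≤ x0 + dx ∧ x0 + dx < 600 ∧ 0 ≤ y0 + dy ∧ y0 + dy < 800 then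
            pvSetCell mask (x0 + dx) (y0 + dy) else mask) acc := by
    intro dx acc
    rw [List.foldl_map, ← PySem.List.foldl_ite_eq_foldl_filter]
    apply PySem.List.foldl_congr_mem
    intro a dy _
    by_cases hg : 0 < dx * dx + dy * dy ∧ dx * dx + dy * dy ≤ 900
    · by_cases hin : 0 ≤ x0 + dx ∧ x0 + dx < 600 ∧ 0 ≤ y0 + dy ∧ y0 + dy < 800
      · simp [hg, hin]
      · simp [hg, hin]
    · simp [hg]
  rw [PySem.List.foldl_congr_mem _ _ _ m (by intro acc dx _; exact e1 dx acc)]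
  -- shift both loops into grid coordinates
  rw [pv_foldl_shift (-30) 31 x0]
  have e2 : ∀ (i : Int) (acc : List (List Int)),
      (PySem.List.pyRange (-30) 31 1).foldl (fun mask dy =>
          if (0 < (i - x0) * (i - x0) + dy * dy ∧ (i - x0) * (i - x0) + dy * dy ≤ 900) ∧
             0 ≤ x0 + (i - x0) ∧ x0 + (i - x0) < 600 ∧ 0 ≤ y0 + dy ∧ y0 + dy < 800 then
            pvSetCell mask (x0 + (i - x0)) (y0 + dy) else mask) acc
      = (PySem.List.pyRange (-30 + y0) (31 + y0) 1).foldl (fun mask j =>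
          if (0 < (i - x0) ^ 2 + (j - y0) ^ 2 ∧ (i - x0) ^ 2 + (j - y0) ^ 2 ≤ 900) ∧
             0 ≤ i ∧ i < 600 ∧ 0 ≤ j ∧ j < 800 then
            pvSetCell mask i j else mask) acc := by
    intro i acc
    rw [pv_foldl_shift (-30) 31 y0]
    apply PySem.List.foldl_congr_mem
    intro a j _
    have h1 : x0 + (i - x0) = i := by ring
    have h2 : y0 + (j - y0) = j := by ring
    have h3 : (i - x0) * (i - x0) = (i - x0) ^ 2 := by ring
    have h4 : (j - y0) * (j - y0) = (j - y0) ^ 2 := by ring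
    rw [h1, h2, h3, h4]
  rw [PySem.List.foldl_congr_mem _ _ _ m (by intro acc i _; exact e2 i acc)]
  -- shrink the row loop to the clamped window (rows outside it fail 0 ≤ i < 600)
  have e3 : ∀ (i : Int) (acc : List (List Int)), ¬ (0 ≤ i ∧ i < 600) →
      (PySem.List.pyRange (-30 + y0) (31 + y0) 1).foldl (fun mask j =>
          if (0 < (i - x0) ^ 2 + (j - y0) ^ 2 ∧ (i - x0) ^ 2 + (j - y0) ^ 2 ≤ 900) ∧
             0 ≤ i ∧ i < 600 ∧ 0 ≤ j ∧ j < 800 then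
            pvSetCell mask i j else mask) acc = acc := by
    intro i acc hi
    rw [PySem.List.foldl_ite_eq_foldl_filter]
    have : (PySem.List.pyRange (-30 + y0) (31 + y0) 1).filter
        (fun j => decide ((0 < (i - x0) ^ 2 + (j - y0) ^ 2 ∧ (i - x0) ^ 2 + (j - y0) ^ 2 ≤ 900) ∧
             0 ≤ i ∧ i < 600 ∧ 0 ≤ j ∧ j < 800)) = [] := by
      rw [List.filter_eq_nil_iff]
      intro j _
      simp only [decide_eq_true_eq]
      intro hc
      exact hi ⟨hc.2.1, hc.2.2.1⟩
    rw [this]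
    rfl
  rw [PySem.List.foldl_congr_mem _ _
      (fun mask i => if 0 ≤ i ∧ i < 600 then
        (PySem.List.pyRange (-30 + y0) (31 + y0) 1).foldl (fun mask j =>
          if (0 < (i - x0) ^ 2 + (j - y0) ^ 2 ∧ (i - x0) ^ 2 + (j - y0) ^ 2 ≤ 900) ∧
             0 ≤ i ∧ i < 600 ∧ 0 ≤ j ∧ j < 800 then
            pvSetCell mask i j else mask) mask else mask) m
      (by
        intro acc i _
        by_cases hi : 0 ≤ i ∧ i < 600
        · simp only [if_pos hi]
        · simp only [if_neg hi]
          exact e3 i acc hi)]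
  rw [PySem.List.foldl_ite_eq_foldl_filter]
  rw [pv_filter_shrink (-30 + x0) (31 + x0) (max 0 (x0 - 30)) (min 600 (x0 + 31)) _
      (by omega) (by omega)
      (by
        intro i hia hib hp
        simp only [decide_eq_true_eq] at hp
        omega)]
  rw [← PySem.List.foldl_ite_eq_foldl_filter]
  apply PySem.List.foldl_congr_mem
  intro acc i hi
  rw [PySem.List.mem_pyRange_one] at hi
  have hiok : 0 ≤ i ∧ i < 600 := by
    constructor
    · exact le_trans (le_max_left 0 (x0 - 30)) hi.1
    · exact lt_of_lt_of_le hi.2 (min_le_left 600 (x0 + 31))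
  rw [if_pos hiok]
  -- shrink the column loop to the clamped window (columns outside it fail 0 ≤ j < 800)
  rw [PySem.List.foldl_ite_eq_foldl_filter]
  rw [pv_filter_shrink (-30 + y0) (31 + y0) (max 0 (y0 - 30)) (min 800 (y0 + 31)) _
      (by omega) (by omega)
      (by
        intro j hja hjb hp
        simp only [decide_eq_true_eq] at hp
        omega)]
  rw [← PySem.List.foldl_ite_eq_foldl_filter]
  apply PySem.List.foldl_congr_mem
  intro a j hj
  rw [PySem.List.mem_pyRange_one] at hj
  have hjok : 0 ≤ j ∧ j < 800 := by
    constructor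
    · exact le_trans (le_max_left 0 (y0 - 30)) hj.1
    · exact lt_of_lt_of_le hj.2 (min_le_left 800 (y0 + 31))
  by_cases hg : 0 < (i - x0) ^ 2 + (j - y0) ^ 2 ∧ (i - x0) ^ 2 + (j - y0) ^ 2 ≤ 900
  · simp [hg, hiok, hjok]
  · simp [hg]

-- ===== VERDICT (by name: the statement is the Claim_ definition above) =====
theorem cut_border_spec : Claim_equal_cut_border := by
  intro contour mask_array _ _
  unfold Spec_cut_border cut_border cut_border_alt
  apply PySem.List.foldl_congr_mem
  intro acc con _
  exact (pv_step_eq (PySem.List.pyGetD con 0 0) (PySem.List.pyGetD con 1 0) acc).trans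
    (pv_offsets_step_eq (PySem.List.pyGetD con 0 0) (PySem.List.pyGetD con 1 0) acc).symm
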